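-- pv_equiv track=rewrite | github.com/alexjilkin/sampling-markov-equivalent-dag | src/partition.py | get_permissible_parent_sets
-- ===== SOURCE A (Python) =====
-- import itertools
--
-- max_parents_size = 3
--
-- def get_permissible_parent_sets(partitions: list[set], v: int):
--     partition_index = 0
--     v_index_for_searching = 0
--
--     # Find the partition containing v and its index.
--     for i, partition in enumerate(partitions):
--         if v in partition:
--             partition_index = i
--             break
--         v_index_for_searching += len(partition)
--
--     # If the vertex is in the last partition, return empty set
--     if partition_index == len(partitions) - 1:
--         return [frozenset()]
--
--     # Get the vertices to the right of the current vertex's partition.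
--     vertices_to_right = list(itertools.chain.from_iterable(
--         partitions[partition_index + 1:]))
--
--     # Generator to yield permissible parent sets
--     def parent_sets_generator():
--         partition_to_the_right = partitions[partition_index + 1]
--         for size in range(1, max_parents_size + 1):
--             for p in itertools.permutations(vertices_to_right, size):
--                 parent_set = frozenset(p)
--                 if len(parent_set.intersection(partition_to_the_right)) > 0:
--                     yield parent_set
--
--     parent_sets = list(set(parent_sets_generator()))
--
--     return parent_sets
-- ===== SOURCE B (Python) =====
-- import itertools
--
-- max_parents_size = 3
--
-- def get_permissible_parent_sets(partitions: list, v: int):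
--     # B: instead of enumerating every permutation of all vertices to the right and
--     # filtering by intersection, build only the valid parent sets directly:
--     # a non-empty combination from the next partition plus a combination from the rest.
--     partition_index = 0
--     for i, partition in enumerate(partitions):
--         if v in partition:
--             partition_index = i
--             break
--
--     if partition_index == len(partitions) - 1:
--         return [frozenset()]
--
--     nxt = sorted(set(partitions[partition_index + 1]))
--     rest = sorted(set(itertools.chain.from_iterable(partitions[partition_index + 2:])))
--
--     out = set()
--     for j in range(1, max_parents_size + 1):
--         for a in itertools.combinations(nxt, j):
--             for k in range(0, max_parents_size + 1 - j):
--                 for b in itertools.combinations(rest, k):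
--                     out.add(frozenset(a + b))
--     return list(out)
-- ===== Notes on version B (the rewrite author's own statement) =====
-- stated objective: alternative
-- what changed: Instead of enumerating all size-1..3 permutations of every vertex to the right and filtering by intersection with the next partition, B directly builds each valid parent set as a non-empty combination from the next partition joined with a combination from the remaining partitions.
import Mathlib
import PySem

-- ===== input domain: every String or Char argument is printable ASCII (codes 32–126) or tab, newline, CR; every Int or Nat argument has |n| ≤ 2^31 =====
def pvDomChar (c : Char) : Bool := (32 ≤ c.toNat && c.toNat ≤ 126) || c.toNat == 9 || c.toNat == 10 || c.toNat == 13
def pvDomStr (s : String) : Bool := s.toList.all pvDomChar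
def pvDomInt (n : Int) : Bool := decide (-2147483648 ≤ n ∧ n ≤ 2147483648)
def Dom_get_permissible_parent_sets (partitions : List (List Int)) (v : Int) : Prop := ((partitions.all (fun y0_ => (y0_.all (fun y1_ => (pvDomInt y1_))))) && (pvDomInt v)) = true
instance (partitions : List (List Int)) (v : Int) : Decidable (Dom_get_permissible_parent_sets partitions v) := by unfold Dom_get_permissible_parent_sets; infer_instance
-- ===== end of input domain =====

-- B replaces A's filtered enumeration of all size-1..3 permutations by a direct product of
-- combinations (non-empty part from the next partition × part from the rest), each valid set once.
-- Python frozensets are represented canonically as strictly sorted lists; `list(set(...))`'s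
-- iteration order is unspecified in Python (outputs are compared as sets), so both ports render
-- it in canonical sorted order.

-- ===== PORT A =====
-- canonical representation of a Python frozenset built from a list of ints: sorted distinct elements
def pvCanon (l : List Int) : List Int := List.insertionSort (· ≤ ·) l.dedup

-- canonical rendering of Python's `list(set(...))` over frozensets (iteration order unspecified,
-- outputs compared as sets): the distinct elements in lexicographically sorted order
def pvSortSets (l : List (List Int)) : List (List Int) := List.insertionSort (· ≤ ·) l.dedup

-- the `for i, partition in enumerate(partitions): if v in partition: partition_index = i; break`
-- loop (default 0); shared by both ports, whose Pythons contain the identical scan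
def pvFindPartIdxAux : List (List Int) → Int → Nat → Option Nat
  | [], _, _ => none
  | p :: rest, v, i => if v ∈ p then some i else pvFindPartIdxAux rest v (i + 1)

def pvFindPartIdx (partitions : List (List Int)) (v : Int) : Nat :=
  (pvFindPartIdxAux partitions v 0).getD 0

-- itertools internals of `permutations`: all ways to pick one element with its remainder
def pvPicks : List Int → List (Int × List Int)
  | [] => []
  | x :: xs => (x, xs) :: (pvPicks xs).map (fun q => (q.1, x :: q.2))

-- itertools.permutations(xs, n): all tuples of n elements at distinct positions
def pvPerms : List Int → Nat → List (List Int)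
  | _, 0 => [[]]
  | xs, n + 1 => (pvPicks xs).flatMap (fun q => (pvPerms q.2 n).map (q.1 :: ·))

def get_permissible_parent_sets (partitions : List (List Int)) (v : Int) : List (List Int) :=
  let partition_index := pvFindPartIdx partitions v
  if (partition_index : Int) = (partitions.length : Int) - 1 then
    [[]]
  else
    -- partitions[partition_index + 1] (in range whenever partitions ≠ [], i.e. whenever A returns)
    let partition_to_the_right := (PySem.List.pyGet? partitions ((partition_index : Int) + 1)).getD []
    -- partitions[partition_index + 1:] flattened (index ≥ 0, so the slice is a drop)
    let vertices_to_right := (partitions.drop (partition_index + 1)).flatten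
    -- for size in range(1, max_parents_size + 1): for p in permutations(vertices_to_right, size):
    --   keep frozenset(p) if it intersects partition_to_the_right
    let gen := [1, 2, 3].flatMap (fun size =>
      (pvPerms vertices_to_right size).filterMap (fun p =>
        let parent_set := pvCanon p
        if 0 < (parent_set.filter (fun x => decide (x ∈ partition_to_the_right))).length
        then some parent_set else none))
    pvSortSets gen  -- list(set(generator))

-- ===== PORT B =====
def get_permissible_parent_sets_alt (partitions : List (List Int)) (v : Int) : List (List Int) :=
  let partition_index := pvFindPartIdx partitions v
  if (partition_index : Int) = (partitions.length : Int) - 1 then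
    [[]]
  else
    -- nxt = sorted(set(partitions[partition_index + 1]))
    let nxt := pvCanon ((PySem.List.pyGet? partitions ((partition_index : Int) + 1)).getD [])
    -- rest = sorted(set(chain(partitions[partition_index + 2:])))
    let rest := pvCanon (partitions.drop (partition_index + 2)).flatten
    -- for j in 1..3: for a in combinations(nxt, j): for k in 0..3-j: for b in combinations(rest, k)
    let res := [1, 2, 3].flatMap (fun j =>
      (List.sublistsLen j nxt).flatMap (fun a =>
        (List.range (4 - j)).flatMap (fun k =>
          (List.sublistsLen k rest).map (fun b => pvCanon (a ++ b)))))
    pvSortSets res  -- list(out) where out is the accumulated set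

-- ===== PRECONDITION & SPEC =====
-- Pre_ excludes only partitions = [], on which Python A raises IndexError (partitions[1]).
def Pre_get_permissible_parent_sets (partitions : List (List Int)) (v : Int) : Prop :=
  partitions ≠ []
instance (partitions : List (List Int)) (v : Int) : Decidable (Pre_get_permissible_parent_sets partitions v) := by unfold Pre_get_permissible_parent_sets; infer_instance

def pvWitness_get_permissible_parent_sets : List (List Int) × Int := ([[1], [2, 3], [4]], 1)

def Spec_get_permissible_parent_sets (partitions : List (List Int)) (v : Int) (out : List (List Int)) : Prop := out = get_permissible_parent_sets_alt partitions v
instance (partitions : List (List Int)) (v : Int) (out : List (List Int)) : Decidable (Spec_get_permissible_parent_sets partitions v out) := by unfold Spec_get_permissible_parent_sets; infer_instance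

-- ===== CLAIM (what is proved, stated in full; the proofs are below) =====
def Claim_equal_get_permissible_parent_sets : Prop := ∀ (partitions : List (List Int)) (v : Int), Dom_get_permissible_parent_sets partitions v → Pre_get_permissible_parent_sets partitions v → Spec_get_permissible_parent_sets partitions v (get_permissible_parent_sets partitions v)

-- ===== LEMMAS AND PROOFS =====

-- the common characterization of both generated collections, relative to the next partition `nxt`
-- and the flattened remaining partitions `rest`
def PvValid (nxt rest s : List Int) : Prop :=
  List.Pairwise (· < ·) s ∧ 1 ≤ s.length ∧ s.length ≤ 3 ∧
    (∀ x ∈ s, x ∈ nxt ++ rest) ∧ (∃ x ∈ s, x ∈ nxt)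

theorem mem_pvCanon {x : Int} {l : List Int} : x ∈ pvCanon l ↔ x ∈ l := by
  unfold pvCanon
  rw [(List.perm_insertionSort _ _).mem_iff, List.mem_dedup]

theorem pairwise_lt_pvCanon (l : List Int) : List.Pairwise (· < ·) (pvCanon l) := by
  have hle : List.Pairwise (· ≤ ·) (pvCanon l) := List.pairwise_insertionSort _ _
  have hnd : (pvCanon l).Nodup :=
    ((List.perm_insertionSort _ _).nodup_iff).mpr (List.nodup_dedup l)
  exact (hle.and hnd).imp (fun h => lt_of_le_of_ne h.1 h.2)

theorem nodup_of_pairwise_lt {l : List Int} (h : List.Pairwise (· < ·) l) : l.Nodup :=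
  h.imp (fun h => ne_of_lt h)

theorem pvCanon_eq_self {s : List Int} (h : List.Pairwise (· < ·) s) : pvCanon s = s := by
  unfold pvCanon
  rw [List.dedup_eq_self.2 (nodup_of_pairwise_lt h)]
  exact List.Pairwise.insertionSort_eq (h.imp (fun h => le_of_lt h))

theorem pairwise_lt_ext {s t : List Int} (hs : List.Pairwise (· < ·) s)
    (ht : List.Pairwise (· < ·) t) (hm : ∀ x, x ∈ s ↔ x ∈ t) : s = t := by
  have hp : s.Perm t :=
    (List.perm_ext_iff_of_nodup (nodup_of_pairwise_lt hs) (nodup_of_pairwise_lt ht)).2 hm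
  exact hp.eq_of_pairwise (fun a b _ _ h1 h2 => absurd h2 (asymm h1)) hs ht

theorem pvCanon_eq_of_perm {l s : List Int} (hp : l.Perm s) (hs : List.Pairwise (· < ·) s) :
    pvCanon l = s :=
  pairwise_lt_ext (pairwise_lt_pvCanon l) hs (fun _ => mem_pvCanon.trans hp.mem_iff)

theorem length_pvCanon_le (l : List Int) : (pvCanon l).length ≤ l.length := by
  unfold pvCanon
  rw [List.length_insertionSort]
  exact (List.dedup_sublist l).length_le

theorem pvSortSets_eq_of_mem_iff {l₁ l₂ : List (List Int)}
    (hm : ∀ a, a ∈ l₁ ↔ a ∈ l₂) : pvSortSets l₁ = pvSortSets l₂ := by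
  have hd : l₁.dedup.Perm l₂.dedup :=
    (List.perm_ext_iff_of_nodup (List.nodup_dedup _) (List.nodup_dedup _)).2
      (fun a => by rw [List.mem_dedup, List.mem_dedup]; exact hm a)
  unfold pvSortSets
  refine List.Perm.eq_of_pairwise (le := (· ≤ · : List Int → List Int → Prop))
    (fun a b _ _ h1 h2 => le_antisymm h1 h2) ?_ ?_ ?_
  · exact List.pairwise_insertionSort _ _
  · exact List.pairwise_insertionSort _ _
  · exact ((List.perm_insertionSort _ _).trans hd).trans (List.perm_insertionSort _ _).symm

-- a strictly sorted list is a sublist of any strictly sorted list containing its elements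
theorem pairwise_lt_sublist : ∀ {t a : List Int}, List.Pairwise (· < ·) a →
    List.Pairwise (· < ·) t → (∀ x ∈ a, x ∈ t) → a.Sublist t := by
  intro t
  induction t with
  | nil => intro a _ _ hsub
           cases a with
           | nil => exact List.Sublist.refl _
           | cons x xs => exact absurd (hsub x (by simp)) (by simp)
  | cons y t' ih =>
    intro a ha ht hsub
    cases a with
    | nil => exact List.nil_sublist _
    | cons x xs =>
      rcases List.pairwise_cons.1 ha with ⟨hxlt, hxs⟩
      rcases List.pairwise_cons.1 ht with ⟨hylt, ht'⟩
      by_cases hxy : x = y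
      · rw [hxy]
        refine List.Sublist.cons₂ y (ih hxs ht' ?_)
        intro z hz
        have hz' := hsub z (List.mem_cons_of_mem _ hz)
        rcases List.mem_cons.1 hz' with h | h
        · exact ((ne_of_gt (hxy ▸ hxlt z hz)) h).elim
        · exact h
      · refine List.Sublist.cons y (ih ha ht' ?_)
        intro z hz
        have hz' := hsub z hz
        rcases List.mem_cons.1 hz' with h | h
        · exfalso
          have hxt : x ∈ t' := by
            rcases List.mem_cons.1 (hsub x (by simp)) with h' | h'
            · exact (hxy h').elim
            · exact h'
          have h1 : y < x := hylt x hxt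
          rcases List.mem_cons.1 hz with h'' | h''
          · omega
          · have h2 : x < z := hxlt z h''
            omega
        · exact h

theorem pvPicks_sound {xs : List Int} {q : Int × List Int} (h : q ∈ pvPicks xs) :
    q.1 ∈ xs ∧ ∀ x ∈ q.2, x ∈ xs := by
  induction xs generalizing q with
  | nil => simp [pvPicks] at h
  | cons y ys ih =>
    simp only [pvPicks, List.mem_cons, List.mem_map] at h
    rcases h with h | ⟨q', hq', rfl⟩
    · subst h; exact ⟨by simp, fun x hx => by simp [hx]⟩
    · rcases ih hq' with ⟨h1, h2⟩
      refine ⟨List.mem_cons_of_mem _ h1, fun x hx => ?_⟩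
      rcases List.mem_cons.1 hx with h | h
      · simp [h]
      · exact List.mem_cons_of_mem _ (h2 x h)

theorem pvPicks_complete {xs : List Int} {z : Int} (hz : z ∈ xs) :
    ∃ r, (z, r) ∈ pvPicks xs ∧ ∀ x ∈ xs, x ≠ z → x ∈ r := by
  induction xs with
  | nil => simp at hz
  | cons y ys ih =>
    by_cases hzy : z = y
    · subst hzy
      refine ⟨ys, by simp [pvPicks], fun x hx hne => ?_⟩
      rcases List.mem_cons.1 hx with h | h
      · exact absurd h hne
      · exact h
    · have hz' : z ∈ ys := by
        rcases List.mem_cons.1 hz with h | h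
        · exact absurd h hzy
        · exact h
      rcases ih hz' with ⟨r, hr, hcov⟩
      refine ⟨y :: r, ?_, fun x hx hne => ?_⟩
      · simp only [pvPicks, List.mem_cons, List.mem_map]
        exact Or.inr ⟨(z, r), hr, rfl⟩
      · rcases List.mem_cons.1 hx with h | h
        · simp [h]
        · exact List.mem_cons_of_mem _ (hcov x h hne)

theorem pvPerms_sound : ∀ {n : Nat} {xs p : List Int}, p ∈ pvPerms xs n →
    p.length = n ∧ ∀ x ∈ p, x ∈ xs := by
  intro n
  induction n with
  | zero => intro xs p h; simp [pvPerms] at h; simp [h]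
  | succ m ih =>
    intro xs p h
    simp only [pvPerms, List.mem_flatMap, List.mem_map] at h
    rcases h with ⟨q, hq, p', hp', rfl⟩
    rcases pvPicks_sound hq with ⟨h1, h2⟩
    rcases ih hp' with ⟨hlen, hmem⟩
    refine ⟨by simp [hlen], fun x hx => ?_⟩
    rcases List.mem_cons.1 hx with h | h
    · subst h; exact h1
    · exact h2 x (hmem x h)

theorem pvPerms_complete : ∀ {s xs : List Int}, List.Pairwise (· < ·) s →
    (∀ x ∈ s, x ∈ xs) → s ∈ pvPerms xs s.length := by
  intro s
  induction s with
  | nil => intro xs _ _; simp [pvPerms]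
  | cons z s' ih =>
    intro xs hs hsub
    rcases List.pairwise_cons.1 hs with ⟨hzlt, hs'⟩
    rcases pvPicks_complete (hsub z (by simp)) with ⟨r, hr, hcov⟩
    have hsub' : ∀ x ∈ s', x ∈ r := fun x hx =>
      hcov x (hsub x (List.mem_cons_of_mem _ hx)) (ne_of_gt (hzlt x hx))
    simp only [List.length_cons, pvPerms, List.mem_flatMap, List.mem_map]
    exact ⟨(z, r), hr, s', ih hs' hsub', rfl⟩

theorem length_filter_pos_iff {l : List Int} {q : Int → Bool} :
    0 < (l.filter q).length ↔ ∃ x ∈ l, q x := by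
  rw [List.length_pos_iff, Ne, List.filter_eq_nil_iff]
  simp only [not_forall]
  simp

-- membership characterization of A's generated collection
theorem memGenA (nxt rest s : List Int) :
    s ∈ [1, 2, 3].flatMap (fun size =>
      (pvPerms (nxt ++ rest) size).filterMap (fun p =>
        if 0 < ((pvCanon p).filter (fun x => decide (x ∈ nxt))).length
        then some (pvCanon p) else none)) ↔ PvValid nxt rest s := by
  simp only [List.mem_flatMap, List.mem_filterMap]
  constructor
  · rintro ⟨size, hsize, p, hp, hf⟩
    have hif : 0 < ((pvCanon p).filter (fun x => decide (x ∈ nxt))).length ∧ pvCanon p = s := by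
      by_cases h : 0 < ((pvCanon p).filter (fun x => decide (x ∈ nxt))).length
      · simp only [h, if_pos] at hf; exact ⟨h, by simpa using hf⟩
      · simp [h] at hf
    rcases hif with ⟨hpos, rfl⟩
    rcases pvPerms_sound hp with ⟨hlen, hmem⟩
    rcases length_filter_pos_iff.1 hpos with ⟨x, hx, hxn⟩
    have hs3 : size ≤ 3 := by
      simp only [List.mem_cons, List.not_mem_nil, or_false] at hsize
      rcases hsize with h | h | h <;> omega
    refine ⟨pairwise_lt_pvCanon p, ?_, ?_, ?_, ⟨x, hx, of_decide_eq_true hxn⟩⟩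
    · exact List.length_pos_iff.2 (List.ne_nil_of_mem hx)
    · calc (pvCanon p).length ≤ p.length := length_pvCanon_le p
        _ = size := hlen
        _ ≤ 3 := hs3
    · exact fun x hx => hmem x (mem_pvCanon.1 hx)
  · rintro ⟨hpw, h1, h3, hsub, x, hx, hxn⟩
    refine ⟨s.length, ?_, s, pvPerms_complete hpw hsub, ?_⟩
    · have : s.length = 1 ∨ s.length = 2 ∨ s.length = 3 := by omega
      simpa using this
    · rw [pvCanon_eq_self hpw,
        if_pos (length_filter_pos_iff.2 ⟨x, hx, decide_eq_true hxn⟩)]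

-- membership characterization of B's generated collection
theorem memGenB (nxt rest s : List Int) :
    s ∈ [1, 2, 3].flatMap (fun j =>
      (List.sublistsLen j (pvCanon nxt)).flatMap (fun a =>
        (List.range (4 - j)).flatMap (fun k =>
          (List.sublistsLen k (pvCanon rest)).map (fun b => pvCanon (a ++ b)))))
      ↔ PvValid nxt rest s := by
  simp only [List.mem_flatMap, List.mem_map, List.mem_range, List.mem_sublistsLen]
  constructor
  · rintro ⟨j, hj, a, ⟨hasub, halen⟩, k, hk, b, ⟨hbsub, hblen⟩, rfl⟩
    have haj : 1 ≤ j ∧ j ≤ 3 := by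
      simp only [List.mem_cons, List.not_mem_nil, or_false] at hj
      rcases hj with h | h | h <;> omega
    have hane : a ≠ [] := List.length_pos_iff.1 (by omega)
    rcases List.exists_mem_of_ne_nil a hane with ⟨x, hx⟩
    have hxn : x ∈ nxt := mem_pvCanon.1 (hasub.subset hx)
    have hxc : x ∈ pvCanon (a ++ b) := mem_pvCanon.2 (by simp [hx])
    refine ⟨pairwise_lt_pvCanon _, ?_, ?_, ?_, ⟨x, hxc, hxn⟩⟩
    · exact List.length_pos_iff.2 (List.ne_nil_of_mem hxc)
    · calc (pvCanon (a ++ b)).length ≤ (a ++ b).length := length_pvCanon_le _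
        _ = j + k := by simp [halen, hblen]
        _ ≤ 3 := by omega
    · intro y hy
      rcases List.mem_append.1 (mem_pvCanon.1 hy) with h | h
      · exact List.mem_append.2 (Or.inl (mem_pvCanon.1 (hasub.subset h)))
      · exact List.mem_append.2 (Or.inr (mem_pvCanon.1 (hbsub.subset h)))
  · rintro ⟨hpw, h1, h3, hsub, x, hx, hxn⟩
    set a := s.filter (fun x => decide (x ∈ nxt)) with ha
    set b := s.filter (fun x => !decide (x ∈ nxt)) with hb
    have hlen : a.length + b.length = s.length := by
      have h := (List.filter_append_perm (fun x => decide (x ∈ nxt)) s).length_eq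
      rw [List.length_append] at h
      exact h
    have hasl : a.Sublist (pvCanon nxt) := by
      refine pairwise_lt_sublist (hpw.filter _) (pairwise_lt_pvCanon nxt) ?_
      intro y hy
      exact mem_pvCanon.2 (of_decide_eq_true (List.mem_filter.1 hy).2)
    have hbsl : b.Sublist (pvCanon rest) := by
      refine pairwise_lt_sublist (hpw.filter _) (pairwise_lt_pvCanon rest) ?_
      intro y hy
      rcases List.mem_filter.1 hy with ⟨hys, hyn⟩
      have hyr : y ∈ nxt ++ rest := hsub y hys
      rcases List.mem_append.1 hyr with h | h
      · simp [h] at hyn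
      · exact mem_pvCanon.2 h
    have hxa : x ∈ a := List.mem_filter.2 ⟨hx, decide_eq_true hxn⟩
    have ha1 : 1 ≤ a.length := List.length_pos_iff.2 (List.ne_nil_of_mem hxa)
    refine ⟨a.length, ?_, a, ⟨hasl, rfl⟩, b.length, by omega, b, ⟨hbsl, rfl⟩, ?_⟩
    · have : a.length = 1 ∨ a.length = 2 ∨ a.length = 3 := by omega
      simpa using this
    · exact pvCanon_eq_of_perm (List.filter_append_perm _ s) hpw

theorem pvFindPartIdxAux_lt {partitions : List (List Int)} {v : Int} :
    ∀ {i j : Nat}, pvFindPartIdxAux partitions v i = some j → j < i + partitions.length := by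
  induction partitions with
  | nil => intro i j h; simp [pvFindPartIdxAux] at h
  | cons p rest ih =>
    intro i j h
    simp only [pvFindPartIdxAux] at h
    split_ifs at h with hv
    · simp only [Option.some.injEq] at h; simp only [List.length_cons]; omega
    · have := ih h; simp only [List.length_cons]; omega

theorem pvFindPartIdx_lt {partitions : List (List Int)} {v : Int} (h : partitions ≠ []) :
    pvFindPartIdx partitions v < partitions.length := by
  unfold pvFindPartIdx
  cases hq : pvFindPartIdxAux partitions v 0 with
  | none => simpa using List.length_pos_iff.2 h
  | some j => simpa using pvFindPartIdxAux_lt hq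

-- ===== VERDICT (by name: the statement is the Claim_ definition above) =====
theorem get_permissible_parent_sets_spec : Claim_equal_get_permissible_parent_sets := by
  intro partitions v _hdom hpre
  unfold Spec_get_permissible_parent_sets
  unfold get_permissible_parent_sets get_permissible_parent_sets_alt
  set idx := pvFindPartIdx partitions v with hidx
  by_cases h : (idx : Int) = (partitions.length : Int) - 1
  · simp only [if_pos h]
  · simp only [if_neg h]
    have hlt : idx + 1 < partitions.length := by
      have h1 : idx < partitions.length := pvFindPartIdx_lt hpre
      have h2 : (idx : Int) ≠ (partitions.length : Int) - 1 := h
      omega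
    have hget : PySem.List.pyGet? partitions ((idx : Int) + 1) = some partitions[idx + 1] := by
      have : ((idx : Int) + 1) = ((idx + 1 : Nat) : Int) := by push_cast; ring
      rw [this, PySem.List.pyGet?_natCast, List.getElem?_eq_getElem hlt]
    rw [hget]
    simp only [Option.getD_some]
    have hdrop : partitions.drop (idx + 1) = partitions[idx + 1] :: partitions.drop (idx + 2) :=
      List.drop_eq_getElem_cons hlt
    rw [hdrop]
    apply pvSortSets_eq_of_mem_iff
    intro s
    rw [List.flatten_cons]
    exact (memGenA partitions[idx + 1] (partitions.drop (idx + 2)).flatten s).trans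
      (memGenB partitions[idx + 1] (partitions.drop (idx + 2)).flatten s).symm
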